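-- pv_equiv track=rewrite | github.com/risehnhew/Finding-Idiomaticity-in-Word-Representations | utils.py | insert_words
-- ===== SOURCE A (Python) =====
-- def insert_words(sentence, tag, compound):
--   """
--   This function inserts two words into a sentence at the positions indicated by True values in the tag.
--
--   Args:
--       sentence: The original sentence to modify.
--       tag: A list of booleans indicating where to insert words (True for insertion, False otherwise).
--       words: A list containing the two words to insert (corresponding to the True positions in the tag).
--
--   Returns:
--       The modified sentence with the words inserted.
--   """
--   # words = words.split()
--   word_list = sentence.split()
--
--   # Check if the tag and words list have the correct length
--   if len(tag) != len(word_list):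
--     breakpoint()
--     raise ValueError("Tag and words list must have the same length as the number of words in the sentence.")
--
--
--   modified_sentence = ""
--   for i, word in enumerate(word_list):
--     if tag[i]:
--       # breakpoint()
--       if i == (len(tag)-1):
--         modified_sentence += compound + " "  # Insert the compound
--         continue
--       elif tag[i+1]:
--         continue
--       else:
--         modified_sentence += compound + " "  # Insert the compound
--
--     else:
--       modified_sentence += word + " "
--   return modified_sentence.strip()
-- ===== SOURCE B (Python) =====
-- def insert_words(sentence, tag, compound):
--   word_list = sentence.split()
--
--   if len(tag) != len(word_list):
--     breakpoint()
--     raise ValueError("Tag and words list must have the same length as the number of words in the sentence.")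
--
--   # Staged index pipeline: compute, as two separate index lists, the positions of
--   # run-starts of True tags (each contributes one compound) and the positions of
--   # untagged words; merge them in position order by sorting, then render and join.
--   n = len(tag)
--   starts = [i for i in range(n) if tag[i] and (i == 0 or not tag[i - 1])]
--   plain = [i for i in range(n) if not tag[i]]
--   order = sorted(starts + plain)
--   return ' '.join(compound if tag[i] else word_list[i] for i in order).strip()
-- ===== Notes on version B (the rewrite author's own statement) =====
-- stated objective: alternative
-- what changed: Replaces A's sequential scan with tag[i+1] lookahead and string concatenation by a staged index pipeline: two comprehensions compute the index lists of True-run starts and of untagged words, sorted() merges them in position order, and the rendered tokens are joined.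
import Mathlib
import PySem

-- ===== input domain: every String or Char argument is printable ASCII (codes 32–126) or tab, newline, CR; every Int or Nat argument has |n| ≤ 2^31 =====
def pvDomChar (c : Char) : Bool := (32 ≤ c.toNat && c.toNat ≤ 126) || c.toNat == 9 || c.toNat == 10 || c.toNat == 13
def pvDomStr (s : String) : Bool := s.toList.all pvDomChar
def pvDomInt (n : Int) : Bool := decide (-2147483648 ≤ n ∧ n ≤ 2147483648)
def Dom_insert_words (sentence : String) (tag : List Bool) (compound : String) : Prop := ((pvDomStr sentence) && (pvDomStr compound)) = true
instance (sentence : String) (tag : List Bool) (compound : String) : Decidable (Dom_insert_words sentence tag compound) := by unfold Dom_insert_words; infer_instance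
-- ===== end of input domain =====

-- B replaces A's sequential scan with tag[i+1] lookahead by a staged index pipeline:
-- two comprehensions collect the indices of True-run starts and of untagged words,
-- sorted() merges them in position order, and the rendered tokens are joined (alternative decomposition; same return value).

-- ===== PORT A =====
-- The for-loop over enumerate(word_list) with tag[i]/tag[i+1] lookups becomes the obvious
-- lockstep recursion over word_list and tag (the guard makes their lengths equal);
-- 'i == len(tag)-1' is the case where the remaining tag list is empty.
def insertLoopA (c : List Char) : List (List Char) → List Bool → List Char
  | [], _ => []
  | _ :: _, [] => []
  | w :: ws, t :: ts =>
    if t then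
      (match ts with
       | [] => c ++ [' ']                                  -- last word: insert the compound
       | t' :: _ => if t' then [] else c ++ [' '])         -- next is True: continue; else insert
      ++ insertLoopA c ws ts
    else (w ++ [' ']) ++ insertLoopA c ws ts

def insert_words (sentence : String) (tag : List Bool) (compound : String) : String :=
  let word_list := PySem.Chars.split₀ sentence.toList
  if tag.length ≠ word_list.length then ""                 -- Python: breakpoint(); raise ValueError (excluded by Pre_)
  else String.ofList (PySem.Chars.strip (insertLoopA compound.toList word_list tag))

-- ===== PORT B =====
-- Two filters over range(n) build the index lists 'starts' (True-run starts) and 'plain'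
-- (untagged positions); sorted(starts + plain) merges them; the map renders each index
-- (compound at a run start, the word otherwise) and ' '.join(...).strip() finishes.
-- tag[i] / tag[i-1] / word_list[i] are in-range for i in range(n) under the guard, so
-- they are ported with getD (exact there).
def insert_words_alt (sentence : String) (tag : List Bool) (compound : String) : String :=
  let word_list := PySem.Chars.split₀ sentence.toList
  if tag.length ≠ word_list.length then ""                 -- same guard as A (breakpoint(); raise ValueError)
  else
    let n := tag.length
    let starts := (List.range n).filter
      (fun i => tag.getD i false && (decide (i = 0) || !(tag.getD (i - 1) false)))
    let plain := (List.range n).filter (fun i => !(tag.getD i false))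
    let order := PySem.List.sorted (starts ++ plain) (fun x => x) false
    String.ofList (PySem.Chars.strip (PySem.Chars.join [' ']
      (order.map (fun i => if tag.getD i false then compound.toList else word_list.getD i []))))

-- ===== PRECONDITION & SPEC =====
-- Pre_ excludes exactly the inputs where len(tag) != len(sentence.split()):
-- there both A and B hit breakpoint() and raise ValueError, returning nothing.
def Pre_insert_words (sentence : String) (tag : List Bool) (compound : String) : Prop :=
  tag.length = (PySem.Chars.split₀ sentence.toList).length
instance (sentence : String) (tag : List Bool) (compound : String) : Decidable (Pre_insert_words sentence tag compound) := by unfold Pre_insert_words; infer_instance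

def pvWitness_insert_words : String × List Bool × String := ("a big cat", [false, true, true], "big_cat")

def Spec_insert_words (sentence : String) (tag : List Bool) (compound : String) (out : String) : Prop := out = insert_words_alt sentence tag compound
instance (sentence : String) (tag : List Bool) (compound : String) (out : String) : Decidable (Spec_insert_words sentence tag compound out) := by unfold Spec_insert_words; infer_instance

-- ===== CLAIM (what is proved, stated in full; the proofs are below) =====
def Claim_equal_insert_words : Prop := ∀ (sentence : String) (tag : List Bool) (compound : String), Dom_insert_words sentence tag compound → Pre_insert_words sentence tag compound → Spec_insert_words sentence tag compound (insert_words sentence tag compound)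

-- ===== LEMMAS AND PROOFS =====

-- proof-side description of the result as one token per maximal True run / untagged word,
-- tracking the previous tag (neither port computes this)
def runParts (c : List Char) : List (List Char × Bool) → Bool → List (List Char)
  | [], _ => []
  | (w, t) :: rest, prev =>
    (if t then (if prev then [] else [c]) else [w]) ++ runParts c rest t

-- concatenation of the parts, each followed by one space (A's loop builds exactly this)
def catParts (parts : List (List Char)) : List Char := (parts.map (· ++ [' '])).flatten

theorem runParts_cons_false (c w : List Char) (l : List (List Char × Bool)) (prev : Bool) :
    runParts c ((w, false) :: l) prev = w :: runParts c l false := by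
  simp [runParts]

-- main invariant for A: A's loop output is the space-suffixed concatenation of the run
-- tokens; and when the first tag is True, a True run already begun has its compound
-- emitted, so the continuation contributes nothing for it.
theorem loopA_eq_catParts (c : List Char) :
    ∀ (ws : List (List Char)) (ts : List Bool), ws.length = ts.length →
      insertLoopA c ws ts = catParts (runParts c (ws.zip ts) false) ∧
      (∀ ts', ts = true :: ts' →
        insertLoopA c ws ts = c ++ ' ' :: catParts (runParts c (ws.zip ts) true)) := by
  intro ws
  induction ws with
  | nil =>
    intro ts h
    have : ts = [] := by cases ts <;> simp_all
    subst this
    exact ⟨rfl, by intro ts' h; cases h⟩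
  | cons w ws ih =>
    intro ts h
    cases ts with
    | nil => simp at h
    | cons t ts =>
      have hlen : ws.length = ts.length := by simpa using h
      cases t with
      | false =>
        have hP := (ih ts hlen).1
        constructor
        · simp [insertLoopA, runParts_cons_false, catParts, hP]
        · intro ts' h'; cases h'
      | true =>
        -- core computation, shared by both conjuncts
        have key : insertLoopA c (w :: ws) (true :: ts)
            = c ++ ' ' :: catParts (runParts c (ws.zip ts) true) := by
          cases ts with
          | nil =>
            have : ws = [] := by cases ws <;> simp_all
            subst this
            simp [insertLoopA, runParts, catParts]
          | cons t' ts' =>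
            cases t' with
            | true =>
              have hQ := (ih (true :: ts') hlen).2 ts' rfl
              simp [insertLoopA, hQ]
            | false =>
              cases ws with
              | nil => simp at hlen
              | cons w' ws' =>
                have hP := (ih (false :: ts') hlen).1
                have h1 : insertLoopA c (w :: w' :: ws') (true :: false :: ts')
                    = (c ++ [' ']) ++ insertLoopA c (w' :: ws') (false :: ts') := by
                  simp [insertLoopA]
                rw [h1, hP]
                simp [List.zip_cons_cons, runParts_cons_false, catParts]
        refine ⟨?_, ?_⟩
        · rw [key]; simp [runParts, catParts]
        · intro ts' h'
          rw [key]; simp [runParts]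

-- main invariant for B: mapping the token renderer over the positions kept by the
-- merged predicate (untagged, or tagged with no tagged predecessor — 'prev' at the
-- left boundary) yields exactly the run tokens.
theorem mapFilter_eq_runParts (c : List Char) :
    ∀ (ts : List Bool) (ws : List (List Char)) (prev : Bool), ws.length = ts.length →
      ((List.range ts.length).filter
          (fun i => !(ts.getD i false) || !(if i = 0 then prev else ts.getD (i - 1) false))).map
        (fun i => if ts.getD i false then c else ws.getD i [])
      = runParts c (ws.zip ts) prev := by
  intro ts
  induction ts with
  | nil => intro ws prev _; simp [runParts]
  | cons t ts ih =>
    intro ws prev h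
    cases ws with
    | nil => simp at h
    | cons w ws' =>
      have hlen : ws'.length = ts.length := by simpa using h
      have hcongr : (List.range ts.length).filter
            ((fun i => !((t :: ts).getD i false) ||
              !(if i = 0 then prev else (t :: ts).getD (i - 1) false)) ∘ Nat.succ)
          = (List.range ts.length).filter
            (fun i => !(ts.getD i false) || !(if i = 0 then t else ts.getD (i - 1) false)) := by
        apply List.filter_congr
        intro i _
        cases i with
        | zero => simp
        | succ j => simp
      have hmap : ((fun i => if (t :: ts).getD i false then c else (w :: ws').getD i []) ∘ Nat.succ)
          = (fun i => if ts.getD i false then c else ws'.getD i []) := by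
        funext i; simp
      have hIH := ih ws' t hlen
      rw [List.length_cons, List.range_succ_eq_map, List.filter_cons, List.filter_map, hcongr]
      cases t with
      | false =>
        rw [if_pos (by simp)]
        rw [List.map_cons, List.map_map, hmap, hIH]
        simp [runParts]
      | true =>
        cases prev with
        | false =>
          rw [if_pos (by simp)]
          rw [List.map_cons, List.map_map, hmap, hIH]
          simp [runParts]
        | true =>
          rw [if_neg (by simp)]
          rw [List.map_map, hmap, hIH]
          simp [runParts]

-- merging two filters over disjoint predicates is a permutation of the joint filter
theorem filter_append_perm_filter_or {α : Type} (p q : α → Bool)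
    (hd : ∀ a, p a = true → q a = false) :
    ∀ l : List α, (l.filter p ++ l.filter q).Perm (l.filter (fun a => p a || q a)) := by
  intro l
  induction l with
  | nil => simp
  | cons a l ih =>
    cases hp : p a with
    | true =>
      have hq : q a = false := hd a hp
      simp only [List.filter_cons, hp, hq, if_pos rfl, Bool.true_or,
        Bool.false_eq_true, if_false, List.cons_append]
      exact ih.cons a
    | false =>
      cases hq : q a with
      | true =>
        simp only [List.filter_cons, hp, hq, Bool.false_or, if_pos rfl,
          Bool.false_eq_true, if_false]
        exact List.perm_middle.trans (ih.cons a)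
      | false =>
        simpa [List.filter_cons, hp, hq] using ih

theorem catParts_eq_join_append (parts : List (List Char)) (h : parts ≠ []) :
    catParts parts = PySem.Chars.join [' '] parts ++ [' '] := by
  induction parts with
  | nil => exact absurd rfl h
  | cons p rest ih =>
    cases rest with
    | nil => simp [catParts, PySem.Chars.join, List.intercalate]
    | cons q rest' =>
      have := ih (by simp)
      simp only [catParts, List.map_cons, List.flatten_cons] at this ⊢
      rw [this]
      simp [PySem.Chars.join, List.intercalate, List.intersperse]

theorem rstrip_append_space (l : List Char) :
    PySem.Chars.rstrip (l ++ [' ']) = PySem.Chars.rstrip l := by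
  simp [PySem.Chars.rstrip, List.dropWhile, PySem.Chars.isspace]

theorem strip_append_space (l : List Char) :
    PySem.Chars.strip (l ++ [' ']) = PySem.Chars.strip l := by
  unfold PySem.Chars.strip PySem.Chars.lstrip
  rw [List.dropWhile_append]
  by_cases he : (List.dropWhile PySem.Chars.isspace l).isEmpty
  · simp only [he, if_pos]
    simp only [List.isEmpty_iff] at he
    simp [he, List.dropWhile, PySem.Chars.isspace, PySem.Chars.rstrip]
  · rw [if_neg he, rstrip_append_space]

theorem strip_catParts_eq_strip_join (parts : List (List Char)) :
    PySem.Chars.strip (catParts parts) = PySem.Chars.strip (PySem.Chars.join [' '] parts) := by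
  cases hp : parts with
  | nil => rfl
  | cons p rest =>
    rw [catParts_eq_join_append _ (by simp), strip_append_space]

-- ===== VERDICT (by name: the statement is the Claim_ definition above) =====
theorem insert_words_spec : Claim_equal_insert_words := by
  intro sentence tag compound _ hpre
  unfold Spec_insert_words insert_words insert_words_alt
  have hlen : tag.length = (PySem.Chars.split₀ sentence.toList).length := hpre
  simp only [hlen, ne_eq, not_true_eq_false, if_false]
  rw [← hlen]
  -- B side: the sorted merge of the two index lists is the joint filter over range n
  have hperm := filter_append_perm_filter_or
    (fun i => tag.getD i false && (decide (i = 0) || !(tag.getD (i - 1) false)))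
    (fun i => !(tag.getD i false))
    (by intro a ha; simp at ha ⊢; exact ha.1) (List.range tag.length)
  have hpw : ((List.range tag.length).filter
      (fun i => (tag.getD i false && (decide (i = 0) || !(tag.getD (i - 1) false)))
        || !(tag.getD i false))).Pairwise (fun a b => a < b) :=
    List.Pairwise.sublist (List.filter_sublist) (List.pairwise_lt_range)
  have hsorted := PySem.List.sorted_eq_of_perm_of_pairwise_lt
    (xs := ((List.range tag.length).filter
        (fun i => tag.getD i false && (decide (i = 0) || !(tag.getD (i - 1) false))))
      ++ ((List.range tag.length).filter (fun i => !(tag.getD i false))))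
    (key := fun (x : ℕ) => x)
    (ys := (List.range tag.length).filter
      (fun i => (tag.getD i false && (decide (i = 0) || !(tag.getD (i - 1) false)))
        || !(tag.getD i false)))
    (hperm.symm) (hpw)
  rw [hsorted]
  -- rewrite the joint predicate into the boundary-tracking form and apply the invariants
  have hpredeq : (List.range tag.length).filter
      (fun i => (tag.getD i false && (decide (i = 0) || !(tag.getD (i - 1) false)))
        || !(tag.getD i false))
      = (List.range tag.length).filter
      (fun i => !(tag.getD i false) || !(if i = 0 then false else tag.getD (i - 1) false)) := by
    apply List.filter_congr
    intro i _
    by_cases hi : i = 0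
    · subst hi; cases h0 : tag.getD 0 false <;> simp [h0]
    · cases ha : tag.getD i false <;> cases hb : tag.getD (i - 1) false <;>
        simp [hi]
  rw [hpredeq]
  have hB := mapFilter_eq_runParts compound.toList tag
    (PySem.Chars.split₀ sentence.toList) false hlen.symm
  rw [hB]
  rw [(loopA_eq_catParts compound.toList (PySem.Chars.split₀ sentence.toList) tag hlen.symm).1,
      strip_catParts_eq_strip_join]
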